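-- pv_equiv track=rewrite | github.com/chlcken2/python-morph-analysis | word_to_ko210727.py | footer_point_idx
-- ===== SOURCE A (Python) =====
-- def footer_point_idx(whole_list, last_idx):
--     modified_result = []
--     for idx in range(len(whole_list)):
--         if idx > last_idx:  # first_idx = 1
--             modified_result.append('')
--         else:
--             modified_result.append(whole_list[idx])
--     return modified_result
-- ===== SOURCE B (Python) =====
-- def footer_point_idx(whole_list, last_idx):
--     cut = max(last_idx + 1, 0)
--     return whole_list[:cut] + [''] * (len(whole_list) - cut)
-- ===== Notes on version B (the rewrite author's own statement) =====
-- stated objective: simpler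
-- what changed: Replaced the per-index loop with its if/else by a clamped prefix slice plus a single repeated-blank padding list concatenated once.
import Mathlib
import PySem

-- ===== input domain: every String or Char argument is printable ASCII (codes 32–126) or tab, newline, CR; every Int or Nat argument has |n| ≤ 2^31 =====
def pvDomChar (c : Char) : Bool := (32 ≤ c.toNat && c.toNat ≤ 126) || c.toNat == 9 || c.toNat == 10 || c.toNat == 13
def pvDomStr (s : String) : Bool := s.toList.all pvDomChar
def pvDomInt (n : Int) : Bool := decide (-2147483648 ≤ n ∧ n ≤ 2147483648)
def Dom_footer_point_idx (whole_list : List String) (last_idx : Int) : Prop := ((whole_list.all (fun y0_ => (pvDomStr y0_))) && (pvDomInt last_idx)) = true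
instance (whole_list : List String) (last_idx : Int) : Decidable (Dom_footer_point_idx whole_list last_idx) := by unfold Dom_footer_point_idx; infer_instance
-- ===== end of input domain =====

-- B replaces the per-index loop by a clamped prefix slice plus blank padding (simpler, same output).
-- ===== PORT A =====
def footer_point_idx (whole_list : List String) (last_idx : Int) : List String :=
  (PySem.List.pyRange 0 whole_list.length 1).foldl
    (fun modified_result idx =>
      if idx > last_idx then modified_result ++ [""]
      else modified_result ++ [PySem.List.pyGetD whole_list idx ""]) []

-- ===== PORT B =====
def footer_point_idx_alt (whole_list : List String) (last_idx : Int) : List String :=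
  let cut : Int := max (last_idx + 1) 0
  PySem.List.slice whole_list none (some cut) ++
    List.replicate ((whole_list.length : Int) - cut).toNat ""

-- ===== PRECONDITION & SPEC =====
def Spec_footer_point_idx (whole_list : List String) (last_idx : Int) (out : List String) : Prop := out = footer_point_idx_alt whole_list last_idx
instance (whole_list : List String) (last_idx : Int) (out : List String) : Decidable (Spec_footer_point_idx whole_list last_idx out) := by unfold Spec_footer_point_idx; infer_instance

-- ===== CLAIM (what is proved, stated in full; the proofs are below) =====
def Claim_equal_footer_point_idx : Prop := ∀ (whole_list : List String) (last_idx : Int), Dom_footer_point_idx whole_list last_idx → Spec_footer_point_idx whole_list last_idx (footer_point_idx whole_list last_idx)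

-- ===== LEMMAS AND PROOFS =====

-- ===== VERDICT (by name: the statement is the Claim_ definition above) =====
lemma footer_A_eq (whole_list : List String) (last_idx : Int) :
    footer_point_idx whole_list last_idx =
      (List.range whole_list.length).map
        (fun (i : Nat) => if (i : Int) > last_idx then "" else whole_list.getD i "") := by
  unfold footer_point_idx
  rw [PySem.List.pyRange_zero_natCast, List.foldl_map]
  rw [show (fun (acc : List String) (i : Nat) =>
        if (i : Int) > last_idx then acc ++ [""]
        else acc ++ [PySem.List.pyGetD whole_list (i : Int) ""]) =
      (fun acc (i : Nat) => acc ++ [if (i : Int) > last_idx then "" else whole_list.getD i ""])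
    from by funext acc i; split <;> simp [PySem.List.pyGetD_natCast]]
  rw [PySem.List.foldl_append_singleton_eq_map]
  simp

theorem footer_point_idx_spec : Claim_equal_footer_point_idx := by
  intro whole_list last_idx _
  unfold Spec_footer_point_idx
  show _ = PySem.List.slice whole_list none (some (max (last_idx + 1) 0)) ++
    List.replicate ((whole_list.length : Int) - max (last_idx + 1) 0).toNat ""
  rw [footer_A_eq]
  have h0 : (0 : Int) ≤ max (last_idx + 1) 0 := le_max_right _ _
  rw [PySem.List.slice_to _ h0]
  set c : Nat := (max (last_idx + 1) 0).toNat with hc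
  have hci : (max (last_idx + 1) 0) = (c : Int) := by omega
  apply List.ext_getElem
  · simp; omega
  · intro i hi hi'
    have hin : i < whole_list.length := by simpa using hi
    rw [List.getElem_map, List.getElem_range]
    by_cases hlt : i < c
    · have : i < (whole_list.take c).length := by simp; omega
      rw [List.getElem_append_left this, List.getElem_take]
      have : ¬ ((i : Int) > last_idx) := by omega
      simp [this, List.getD_eq_getElem?_getD, hin]
    · have hle : (whole_list.take c).length ≤ i := by simp; omega
      rw [List.getElem_append_right hle, List.getElem_replicate]
      have : (i : Int) > last_idx := by omega
      simp [this]
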